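-- pv_equiv track=rewrite | github.com/blzzua/codewars | 7-kyu/count_salutes.py | count_salutes
-- ===== SOURCE A (Python) =====
-- def count_salutes(hallway):
--     c = 0
--     arr = hallway.replace('-', '')
--     for i in range(0, len(arr) - 1):
--         for j in range(1, len(arr)):
--             if arr[i] + arr[j] == '><' and j > i:
--                 c += 2
--     return c
-- ===== SOURCE B (Python) =====
-- def count_salutes(hallway):
--     c = 0
--     gt = 0  # number of right-facing guards seen so far
--     for ch in hallway:
--         if ch == '>':
--             gt += 1
--         elif ch == '<':
--             c += 2 * gt
--     return c
-- ===== Notes on version B (the rewrite author's own statement) =====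
-- stated objective: faster
-- what changed: Replaced the quadratic double-index scan over the dash-stripped string by a single left-to-right pass that counts right-facing guards seen so far and adds twice that count at every left-facing guard.
import Mathlib
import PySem

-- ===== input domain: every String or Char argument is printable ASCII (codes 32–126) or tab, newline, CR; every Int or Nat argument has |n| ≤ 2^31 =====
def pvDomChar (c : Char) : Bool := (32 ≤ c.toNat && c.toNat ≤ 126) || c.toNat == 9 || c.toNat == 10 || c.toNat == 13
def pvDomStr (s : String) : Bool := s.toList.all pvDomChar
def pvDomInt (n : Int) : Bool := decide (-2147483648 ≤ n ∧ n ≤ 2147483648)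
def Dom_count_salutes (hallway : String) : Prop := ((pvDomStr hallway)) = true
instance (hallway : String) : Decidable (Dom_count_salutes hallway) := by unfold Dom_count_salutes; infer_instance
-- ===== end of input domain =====

-- B replaces A's quadratic double-index scan by a single pass counting right-facing guards seen so far (return-value equivalence).

-- ===== PORT A =====
def count_salutes (hallway : String) : Int :=
  let c : Int := 0
  let arr : List Char := PySem.Chars.replace hallway.toList ['-'] []
  let c := (PySem.List.pyRange 0 (PySem.Chars.len arr - 1) 1).foldl (fun c i =>
    (PySem.List.pyRange 1 (PySem.Chars.len arr) 1).foldl (fun c j =>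
      if ([PySem.List.pyGetD arr i ' ', PySem.List.pyGetD arr j ' '] = ['>', '<'] ∧ j > i)
      then c + 2 else c) c) c
  c

-- ===== PORT B =====
def count_salutes_alt (hallway : String) : Int :=
  let p := hallway.toList.foldl (fun (p : Int × Int) ch =>
      if ch = '>' then (p.1 + 1, p.2)
      else if ch = '<' then (p.1, p.2 + 2 * p.1)
      else p) ((0 : Int), (0 : Int))
  p.2

-- ===== PRECONDITION & SPEC =====
def Spec_count_salutes (hallway : String) (out : Int) : Prop := out = count_salutes_alt hallway
instance (hallway : String) (out : Int) : Decidable (Spec_count_salutes hallway out) := by unfold Spec_count_salutes; infer_instance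

-- ===== CLAIM (what is proved, stated in full; the proofs are below) =====
def Claim_equal_count_salutes : Prop := ∀ (hallway : String), Dom_count_salutes hallway → Spec_count_salutes hallway (count_salutes hallway)

-- ===== LEMMAS AND PROOFS =====

-- number of '<' in a list, as an Int
def cntLt (l : List Char) : Int := (l.countP (· = '<') : Int)

-- 2 × (number of (i,j) pairs with i < j, l[i]='>', l[j]='<')
def pairs : List Char → Int
  | [] => 0
  | x :: xs => ((if x = '>' then 2 * cntLt xs else 0) + pairs xs)

lemma replace_go_filter (fuel : Nat) : ∀ (l acc : List Char), l.length ≤ fuel →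
    PySem.Chars.replace.go ['-'] [] fuel l acc = acc.reverse ++ l.filter (· != '-') := by
  induction fuel with
  | zero =>
    intro l acc h
    have hl : l = [] := by cases l <;> simp_all
    subst hl; simp [PySem.Chars.replace.go]
  | succ n ih =>
    intro l acc h
    cases l with
    | nil => simp [PySem.Chars.replace.go]
    | cons c t =>
      rw [PySem.Chars.replace.go]
      by_cases hc : c = '-'
      · subst hc
        have h' : t.length ≤ n := by simpa using h
        simp [List.isPrefixOf, ih t acc h', List.filter_cons]
      · have hpre : ['-'].isPrefixOf (c :: t) = false := by
          simp [List.isPrefixOf]; exact fun h' => hc h'.symm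
        rw [hpre]
        simp only [Bool.false_eq_true, if_false]
        rw [ih t (c :: acc) (by simpa using h)]
        simp [List.filter_cons, hc]

lemma replace_dash (l : List Char) :
    PySem.Chars.replace l ['-'] [] = l.filter (· != '-') := by
  simp [PySem.Chars.replace]
  simpa using replace_go_filter l.length l [] le_rfl

lemma cntLt_filter (l : List Char) : cntLt (l.filter (· != '-')) = cntLt l := by
  induction l with
  | nil => rfl
  | cons x xs ih =>
    by_cases hx : x = '-'
    · subst hx; simp [List.filter_cons, cntLt, List.countP_cons] at *; omega
    · simp [List.filter_cons, hx, cntLt, List.countP_cons] at *; omega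

lemma pairs_filter (l : List Char) : pairs (l.filter (· != '-')) = pairs l := by
  induction l with
  | nil => rfl
  | cons x xs ih =>
    by_cases hx : x = '-'
    · subst hx; simp [List.filter_cons, pairs, ih]
    · simp [List.filter_cons, hx, pairs, ih, cntLt_filter]

lemma b_loop (l : List Char) : ∀ (g c : Int),
    (l.foldl (fun (p : Int × Int) ch =>
      if ch = '>' then (p.1 + 1, p.2)
      else if ch = '<' then (p.1, p.2 + 2 * p.1)
      else p) (g, c)).2 = c + 2 * g * cntLt l + pairs l := by
  induction l with
  | nil => intro g c; simp [cntLt, pairs]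
  | cons x xs ih =>
    intro g c
    by_cases h1 : x = '>'
    · simp [h1, List.foldl, ih, cntLt, pairs, List.countP_cons]
      ring
    · by_cases h2 : x = '<'
      · simp [h1, h2, List.foldl, ih, cntLt, pairs, List.countP_cons]
        ring
      · simp [h1, h2, List.foldl, ih, cntLt, pairs, List.countP_cons]

lemma sum_ite_two (l : List Char) :
    (l.map (fun c => if c = '<' then (2:Int) else 0)).sum = 2 * cntLt l := by
  have h : (fun c : Char => if c = '<' then (2:Int) else 0)
      = fun c => 2 * (if (fun c : Char => c == '<') c = true then (1:Int) else 0) := by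
    funext c; by_cases hc : c = '<' <;> simp [hc]
  rw [h, List.sum_map_mul_left, PySem.List.sum_map_ite_one_zero]
  simp only [cntLt]
  norm_cast

lemma innerSumA (arr : List Char) (i : Int) (h0 : 0 ≤ i) (hi : i < (arr.length : Int)) :
    ((PySem.List.pyRange 1 (arr.length : Int)).map
      (fun j => if ([PySem.List.pyGetD arr i ' ', PySem.List.pyGetD arr j ' '] = ['>', '<'] ∧ j > i)
                then (2:Int) else 0)).sum
    = if PySem.List.pyGetD arr i ' ' = '>' then 2 * cntLt (arr.drop (i.toNat + 1)) else 0 := by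
  rw [PySem.List.pyRange_one_append 1 (i+1) ((arr.length : Int)) (by omega) (by omega),
    List.map_append, List.sum_append]
  have hfirst : ((PySem.List.pyRange 1 (i+1)).map
      (fun j => if ([PySem.List.pyGetD arr i ' ', PySem.List.pyGetD arr j ' '] = ['>', '<'] ∧ j > i)
                then (2:Int) else 0)).sum = 0 := by
    apply List.sum_eq_zero
    intro x hx
    obtain ⟨j, hj, rfl⟩ := List.mem_map.mp hx
    have hjr := PySem.List.mem_pyRange_one.mp hj
    rw [if_neg]
    rintro ⟨-, hji⟩; omega
  rw [hfirst, zero_add]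
  rw [List.map_congr_left (g := fun j =>
      if PySem.List.pyGetD arr i ' ' = '>' then (if PySem.List.pyGetD arr j ' ' = '<' then (2:Int) else 0) else 0)
    (by
      intro j hj
      have hjr := PySem.List.mem_pyRange_one.mp hj
      by_cases h1 : PySem.List.pyGetD arr i ' ' = '>' <;>
        by_cases h2 : PySem.List.pyGetD arr j ' ' = '<' <;>
          simp [h1, h2]
      omega)]
  by_cases h1 : PySem.List.pyGetD arr i ' ' = '>'
  · simp only [h1, if_true]
    have hcomp : (fun j => if PySem.List.pyGetD arr j ' ' = '<' then (2:Int) else 0)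
        = (fun c : Char => if c = '<' then (2:Int) else 0) ∘ (fun j => PySem.List.pyGetD arr j ' ') := rfl
    rw [hcomp, ← List.map_map, PySem.List.map_pyGetD_pyRange' arr ' ' (by omega : (0:Int) ≤ i + 1),
      sum_ite_two]
    have : (i + 1).toNat = i.toNat + 1 := by omega
    rw [this]
  · simp [h1]

-- A's outer loop extended to the full index range equals pairs (by induction on the list)
lemma outer_nat (arr : List Char) :
    ((List.range arr.length).map
      (fun k => if arr.getD k ' ' = '>' then 2 * cntLt (arr.drop (k + 1)) else (0:Int))).sum
    = pairs arr := by
  induction arr with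
  | nil => simp [pairs]
  | cons x xs ih =>
    rw [List.length_cons, List.range_succ_eq_map, List.map_cons, List.sum_cons, List.map_map]
    have : ((List.range xs.length).map
        ((fun k => if (x :: xs).getD k ' ' = '>' then 2 * cntLt ((x :: xs).drop (k + 1)) else (0:Int)) ∘ Nat.succ)).sum
        = ((List.range xs.length).map
        (fun k => if xs.getD k ' ' = '>' then 2 * cntLt (xs.drop (k + 1)) else (0:Int))).sum := by
      apply congrArg
      apply List.map_congr_left
      intro k _
      simp [Function.comp, List.getD]
    rw [this, ih]
    simp [pairs]

-- dropping the last index from the range changes nothing: its term is 0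
lemma outer_nat_pred (arr : List Char) :
    ((List.range (arr.length - 1)).map
      (fun k => if arr.getD k ' ' = '>' then 2 * cntLt (arr.drop (k + 1)) else (0:Int))).sum
    = pairs arr := by
  cases arr with
  | nil => simp [pairs]
  | cons x xs =>
    rw [← outer_nat]
    have hlen : (x :: xs).length = (x :: xs).length - 1 + 1 := by simp
    rw [hlen, List.range_succ, List.map_append, List.sum_append]
    simp [cntLt]

lemma a_eq_pairs (hallway : String) :
    count_salutes hallway = pairs (PySem.Chars.replace hallway.toList ['-'] []) := by
  unfold count_salutes
  set arr := PySem.Chars.replace hallway.toList ['-'] [] with harr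
  simp only [PySem.Chars.len_eq]
  have hbody : ∀ i : Int,
      (fun (c : Int) (j : Int) =>
        if ([PySem.List.pyGetD arr i ' ', PySem.List.pyGetD arr j ' '] = ['>', '<'] ∧ j > i)
        then c + 2 else c)
      = (fun c j => c +
        (if ([PySem.List.pyGetD arr i ' ', PySem.List.pyGetD arr j ' '] = ['>', '<'] ∧ j > i)
         then (2:Int) else 0)) := by
    intro i; funext c j; split <;> ring
  have houter : (fun (c : Int) (i : Int) =>
      (PySem.List.pyRange 1 ((arr.length : Int))).foldl
        (fun c j => if ([PySem.List.pyGetD arr i ' ', PySem.List.pyGetD arr j ' '] = ['>', '<'] ∧ j > i)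
                    then c + 2 else c) c)
      = (fun c i => c + ((PySem.List.pyRange 1 ((arr.length : Int))).map
        (fun j => if ([PySem.List.pyGetD arr i ' ', PySem.List.pyGetD arr j ' '] = ['>', '<'] ∧ j > i)
                  then (2:Int) else 0)).sum) := by
    funext c i
    rw [hbody i, PySem.List.foldl_add]
  rw [houter, PySem.List.foldl_add, zero_add]
  rw [List.map_congr_left (g := fun i =>
      if PySem.List.pyGetD arr i ' ' = '>' then 2 * cntLt (arr.drop (i.toNat + 1)) else (0:Int))
    (by
      intro i hi
      have hir := PySem.List.mem_pyRange_one.mp hi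
      exact innerSumA arr i hir.1 (by omega))]
  rw [PySem.List.pyRange_one, List.map_map]
  have hcnt : ((arr.length : Int) - 1 - 0).toNat = arr.length - 1 := by omega
  rw [hcnt]
  rw [List.map_congr_left (g := fun k : Nat =>
      if arr.getD k ' ' = '>' then 2 * cntLt (arr.drop (k + 1)) else (0:Int))
    (by
      intro k _
      simp [Function.comp, PySem.List.pyGetD_natCast])]
  exact outer_nat_pred arr

-- ===== VERDICT (by name: the statement is the Claim_ definition above) =====
theorem count_salutes_spec : Claim_equal_count_salutes := by
  intro hallway _
  unfold Spec_count_salutes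
  rw [a_eq_pairs, replace_dash, pairs_filter]
  unfold count_salutes_alt
  rw [b_loop hallway.toList 0 0]
  simp
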